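-- pv_equiv track=rewrite | github.com/JRF63/ROM-EL-ET-Planner | ET_planner.py | filter_channels
-- ===== SOURCE A (Python) =====
-- MAX_HOPS = 100
--
-- def filter_channels(scored_data):
-- 	allowed_channels = {}
--
-- 	for floor, channel_dict in scored_data.items():
-- 		best_score = -MAX_HOPS
-- 		best_channels = []
-- 		for channel, score in channel_dict.items():
-- 			if score > best_score:
-- 				best_score = score
-- 				best_channels = [channel]
-- 			elif score == best_score:
-- 				best_channels.append(channel)
-- 		allowed_channels[floor] = best_channels
--
-- 	return allowed_channels
-- ===== SOURCE B (Python) =====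
-- MAX_HOPS = 100
--
-- def filter_channels(scored_data):
-- 	allowed_channels = {}
-- 	for floor, channel_dict in scored_data.items():
-- 		best_score = max(max(channel_dict.values(), default=-MAX_HOPS), -MAX_HOPS)
-- 		allowed_channels[floor] = [ch for ch, sc in channel_dict.items() if sc == best_score]
-- 	return allowed_channels
-- ===== Notes on version B (the rewrite author's own statement) =====
-- stated objective: simpler
-- what changed: B computes each floor's best score with a single max() call (floored at -MAX_HOPS, matching A's initializer) and then selects the tying channels with one comprehension, instead of A's hand-rolled loop that maintains the running best score and the tie list together.
import Mathlib
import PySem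

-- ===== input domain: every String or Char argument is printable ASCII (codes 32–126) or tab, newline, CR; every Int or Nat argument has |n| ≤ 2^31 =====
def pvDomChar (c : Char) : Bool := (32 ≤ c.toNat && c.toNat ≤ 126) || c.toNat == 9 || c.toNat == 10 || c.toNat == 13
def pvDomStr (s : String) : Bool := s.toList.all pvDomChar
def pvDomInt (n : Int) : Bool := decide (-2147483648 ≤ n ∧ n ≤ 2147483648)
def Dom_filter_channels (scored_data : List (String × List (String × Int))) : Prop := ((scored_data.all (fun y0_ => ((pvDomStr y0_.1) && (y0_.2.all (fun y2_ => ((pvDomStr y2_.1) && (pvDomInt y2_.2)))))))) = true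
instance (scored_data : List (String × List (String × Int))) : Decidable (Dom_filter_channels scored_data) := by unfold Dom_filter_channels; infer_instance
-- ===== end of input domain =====

-- B replaces A's single loop tracking the running best score together with its tie list by
-- a max() call (floored at -MAX_HOPS like A's initializer) followed by one filtering pass (objective: simpler).

-- ===== PORT A =====
-- MAX_HOPS = 100, so the initial best_score is -100.
-- floors are keys of the Python dict, hence distinct: allowed_channels[floor] = … appends a fresh entry.
def filter_channels (scored_data : List (String × List (String × Int))) : List (String × List String) :=
  scored_data.foldl (fun acc fc =>
    let r := fc.2.foldl (fun st p =>
      if p.2 > st.1 then (p.2, [p.1])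
      else if p.2 == st.1 then (st.1, st.2 ++ [p.1])
      else st) ((-100 : Int), ([] : List String))
    acc ++ [(fc.1, r.2)]) []

-- ===== PORT B =====
-- max(channel_dict.values(), default=-MAX_HOPS) → PySem.List.max? on the values, getD (-100)
def filter_channels_alt (scored_data : List (String × List (String × Int))) : List (String × List String) :=
  scored_data.map (fun fc =>
    let best : Int := max ((PySem.List.max? (fc.2.map Prod.snd) (fun y => y)).getD (-100)) (-100)
    (fc.1, (fc.2.filter (fun p => p.2 == best)).map Prod.fst))

-- ===== PRECONDITION & SPEC =====
def Spec_filter_channels (scored_data : List (String × List (String × Int))) (out : List (String × List String)) : Prop := out = filter_channels_alt scored_data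
instance (scored_data : List (String × List (String × Int))) (out : List (String × List String)) : Decidable (Spec_filter_channels scored_data out) := by unfold Spec_filter_channels; infer_instance

-- ===== CLAIM (what is proved, stated in full; the proofs are below) =====
def Claim_equal_filter_channels : Prop := ∀ (scored_data : List (String × List (String × Int))), Dom_filter_channels scored_data → Spec_filter_channels scored_data (filter_channels scored_data)

-- ===== LEMMAS AND PROOFS =====

lemma foldl_max_shift (l : List Int) (i a : Int) :
    l.foldl max (max i a) = max i (l.foldl max a) := by
  induction l generalizing a with
  | nil => simp
  | cons b t ih => simp only [List.foldl_cons, max_assoc, ih]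

lemma inner_inv (l : List (String × Int)) (bs : Int) (bc : List String) :
    l.foldl (fun st p =>
      if p.2 > st.1 then (p.2, [p.1])
      else if p.2 == st.1 then (st.1, st.2 ++ [p.1])
      else st) (bs, bc) =
    ((l.map Prod.snd).foldl max bs,
      (if (l.map Prod.snd).foldl max bs = bs then bc else []) ++
        (l.filter (fun p => p.2 == (l.map Prod.snd).foldl max bs)).map Prod.fst) := by
  induction l generalizing bs bc with
  | nil => simp
  | cons p t ih =>
    obtain ⟨ch, sc⟩ := p
    have hle : ∀ (a : Int), a ≤ (t.map Prod.snd).foldl max a :=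
      fun a => (PySem.List.le_foldl_max (t.map Prod.snd) a).1
    simp only [List.foldl_cons, List.map_cons, List.filter_cons]
    by_cases h1 : sc > bs
    · rw [if_pos (by simpa using h1)]
      rw [ih]
      have hbs : max bs sc = sc := by omega
      have hM : ¬ (t.map Prod.snd).foldl max sc = bs := by
        have := hle sc; omega
      simp only [hbs, hM, if_false, List.nil_append]
      by_cases h2 : (t.map Prod.snd).foldl max sc = sc
      · simp [h2]
      · have h2' : ¬ sc = (t.map Prod.snd).foldl max sc := fun h => h2 h.symm
        simp [h2, h2']
    · rw [if_neg (by simpa using h1)]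
      by_cases h2 : sc = bs
      · rw [if_pos (by simpa using h2)]
        rw [ih]
        have hbs : max bs sc = bs := by omega
        subst h2
        simp only [hbs]
        by_cases h3 : (t.map Prod.snd).foldl max sc = sc
        · simp [h3, List.append_assoc]
        · have h3' : ¬ sc = (t.map Prod.snd).foldl max sc := fun h => h3 h.symm
          simp [h3, h3']
      · rw [if_neg (by simpa using h2)]
        rw [ih]
        have hbs : max bs sc = bs := by omega
        have hsc : ¬ sc = (t.map Prod.snd).foldl max bs := by
          have := hle bs; omega
        simp [hbs, hsc]

lemma best_eq (l : List (String × Int)) :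
    max ((PySem.List.max? (l.map Prod.snd) (fun y => y)).getD (-100)) (-100)
      = (l.map Prod.snd).foldl max (-100 : Int) := by
  cases hl : l.map Prod.snd with
  | nil => simp [PySem.List.max?]
  | cons a t =>
    rw [PySem.List.max?_id_cons]
    simp only [Option.getD_some, List.foldl_cons]
    rw [foldl_max_shift]
    exact max_comm _ _

-- ===== VERDICT (by name: the statement is the Claim_ definition above) =====
theorem filter_channels_spec : Claim_equal_filter_channels := by
  intro scored_data _
  unfold Spec_filter_channels filter_channels filter_channels_alt
  rw [PySem.List.foldl_append_singleton_eq_map, List.nil_append]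
  apply List.map_congr_left
  intro fc _
  simp only [inner_inv, best_eq]
  congr 1
  have hle := (PySem.List.le_foldl_max (fc.2.map Prod.snd) (-100 : Int)).1
  by_cases h : (fc.2.map Prod.snd).foldl max (-100 : Int) = -100 <;> simp [h]
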